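-- pv_equiv track=rewrite | github.com/danikdanon/TelegramBot | BuildingDictionaries.py | dictCurrNext
-- ===== SOURCE A (Python) =====
-- def dictCurrNext(words):
--
--     dict = {}
--
--     for i in range(len(words)-1):
--         curr = words[i]
--         next = words[i+1]
--
--         if curr in dict:
--             if next in dict[curr]:
--                 dict[curr][next]+=1
--             else:
--                 dict[curr][next] = 1
--         else:
--             dict[curr] = {}
--             dict[curr][next] = 1
--
--     return dict
-- ===== SOURCE B (Python) =====
-- def dictCurrNext(words):
--     # Phase 1: flat counter of consecutive pairs, keyed by tuples.
--     pair_counts = {}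
--     for p in zip(words, words[1:]):
--         pair_counts[p] = pair_counts.get(p, 0) + 1
--     # Phase 2: regroup the flat counter into the nested dict.
--     result = {}
--     for (curr, nxt), cnt in pair_counts.items():
--         if curr not in result:
--             result[curr] = {}
--         result[curr][nxt] = cnt
--     return result
-- ===== Notes on version B (the rewrite author's own statement) =====
-- stated objective: alternative
-- what changed: Replaces the single scan that maintains the nested dict with two passes: a flat tuple-keyed counter of consecutive pairs built first, then a regrouping pass over the counter's items that assembles the nested dict.
import Mathlib
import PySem

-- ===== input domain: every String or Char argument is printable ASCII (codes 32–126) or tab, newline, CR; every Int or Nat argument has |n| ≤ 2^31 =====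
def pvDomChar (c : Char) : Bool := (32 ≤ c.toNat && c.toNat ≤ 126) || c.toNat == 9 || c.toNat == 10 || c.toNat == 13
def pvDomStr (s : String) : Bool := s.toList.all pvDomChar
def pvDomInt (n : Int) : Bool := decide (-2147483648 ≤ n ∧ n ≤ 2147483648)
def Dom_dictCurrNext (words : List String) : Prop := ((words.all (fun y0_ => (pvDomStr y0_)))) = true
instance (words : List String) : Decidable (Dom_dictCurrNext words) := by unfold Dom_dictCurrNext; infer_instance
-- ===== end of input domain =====

-- B restructures A's single nested-dict-maintaining scan into two passes: a flat pair counter, then a regrouping pass ('alternative', same cost).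

-- ===== PORT A =====
-- loop body of A (the if/else ladder on dict[curr]/dict[curr][next])
def dcnBodyA (d : PySem.Dict String (PySem.Dict String Int)) (curr next : String) :
    PySem.Dict String (PySem.Dict String Int) :=
  if d.contains curr then
    if (d.getD curr PySem.Dict.empty).contains next then
      d.insert curr ((d.getD curr PySem.Dict.empty).insert next
        ((d.getD curr PySem.Dict.empty).getD next 0 + 1))
    else
      d.insert curr ((d.getD curr PySem.Dict.empty).insert next 1)
  else
    let d1 := d.insert curr PySem.Dict.empty
    d1.insert curr ((d1.getD curr PySem.Dict.empty).insert next 1)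

def dictCurrNext (words : List String) : List (String × List (String × Int)) :=
  let d := (PySem.List.pyRange 0 ((words.length : Int) - 1) 1).foldl
    (fun d i => dcnBodyA d (PySem.List.pyGetD words i "") (PySem.List.pyGetD words (i + 1) ""))
    PySem.Dict.empty
  d.items.map (fun p => (p.1, p.2.items))

-- ===== PORT B =====
-- phase-2 loop body: insert one counted pair into the nested result dict
def dcnRegroupStep (r : PySem.Dict String (PySem.Dict String Int)) (q : (String × String) × Int) :
    PySem.Dict String (PySem.Dict String Int) :=
  let r1 := if r.contains q.1.1 then r else r.insert q.1.1 PySem.Dict.empty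
  r1.insert q.1.1 ((r1.getD q.1.1 PySem.Dict.empty).insert q.1.2 q.2)

def dictCurrNext_alt (words : List String) : List (String × List (String × Int)) :=
  let pairs := words.zip (PySem.List.slice words (some 1) none)
  let pairCounts := pairs.foldl (fun d p => d.insert p (d.getD p 0 + 1)) PySem.Dict.empty
  let result := pairCounts.items.foldl dcnRegroupStep PySem.Dict.empty
  result.items.map (fun p => (p.1, p.2.items))

-- ===== PRECONDITION & SPEC =====
def Spec_dictCurrNext (words : List String) (out : List (String × List (String × Int))) : Prop := out = dictCurrNext_alt words
instance (words : List String) (out : List (String × List (String × Int))) : Decidable (Spec_dictCurrNext words out) := by unfold Spec_dictCurrNext; infer_instance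

-- ===== CLAIM (what is proved, stated in full; the proofs are below) =====
def Claim_equal_dictCurrNext : Prop := ∀ (words : List String), Dom_dictCurrNext words → Spec_dictCurrNext words (dictCurrNext words)

-- ===== LEMMAS AND PROOFS =====

-- shorthand for the nested-dict type (proof-side only)
abbrev DCN := PySem.Dict String (PySem.Dict String Int)

-- A's branchy loop body is a single keyed insert of this value

def dcnVal (d : DCN) (p : String × String) : PySem.Dict String Int :=
  (d.getD p.1 PySem.Dict.empty).insert p.2
    (if d.contains p.1 && (d.getD p.1 PySem.Dict.empty).contains p.2 then
      (d.getD p.1 PySem.Dict.empty).getD p.2 0 + 1 else 1)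

lemma dcnBodyA_eq (d : DCN) (c n : String) :
    dcnBodyA d c n = d.insert c (dcnVal d (c, n)) := by
  unfold dcnBodyA dcnVal
  by_cases h : d.contains c = true
  · by_cases h2 : (d.getD c PySem.Dict.empty).contains n = true <;> simp [h, h2]
  · have h' : d.contains c = false := by simpa using h
    simp [h', PySem.Dict.getD_of_not_contains _ _ h', PySem.Dict.getD_insert_self,
      PySem.Dict.insert_insert_self]

lemma dcnRegroupStep_eq (r : DCN) (q : (String × String) × Int) :
    dcnRegroupStep r q
      = r.insert q.1.1 ((r.getD q.1.1 PySem.Dict.empty).insert q.1.2 q.2) := by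
  unfold dcnRegroupStep
  by_cases h : r.contains q.1.1 = true
  · simp [h]
  · have h' : r.contains q.1.1 = false := by simpa using h
    simp [h', PySem.Dict.getD_of_not_contains _ _ h', PySem.Dict.getD_insert_self,
      PySem.Dict.insert_insert_self]

-- the two folds, in keyed-insert shape

def dcnFoldA (ps : List (String × String)) (d : DCN) : DCN :=
  ps.foldl (fun d p => d.insert p.1 (dcnVal d p)) d

def dcnFoldB (qs : List ((String × String) × Int)) (r : DCN) : DCN :=
  qs.foldl (fun r q => r.insert q.1.1 ((r.getD q.1.1 PySem.Dict.empty).insert q.1.2 q.2)) r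

lemma dcnFoldA_cons (p : String × String) (ps : List (String × String)) (d : DCN) :
    dcnFoldA (p :: ps) d = dcnFoldA ps (d.insert p.1 (dcnVal d p)) := rfl

lemma dcnFoldB_cons (q : (String × String) × Int) (qs : List ((String × String) × Int)) (r : DCN) :
    dcnFoldB (q :: qs) r
      = dcnFoldB qs (r.insert q.1.1 ((r.getD q.1.1 PySem.Dict.empty).insert q.1.2 q.2)) := rfl

lemma dcnRangeAux (g : DCN → String → String → DCN) :
    ∀ (n : Nat) (xs : List String) (d : DCN), xs.length = n + 1 →
      (List.range n).foldl (fun d i => g d (xs.getD i "") (xs.getD (i + 1) "")) d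
        = (xs.zip xs.tail).foldl (fun d p => g d p.1 p.2) d := by
  intro n
  induction n with
  | zero =>
    intro xs d h
    match xs, h with
    | [x], _ => simp [List.range_zero]
  | succ n ih =>
    intro xs d h
    match xs, h with
    | a :: b :: t, h =>
      rw [List.range_succ_eq_map]
      simp only [List.foldl_cons, List.foldl_map, List.getD_cons_zero, List.getD_cons_succ]
      have hz : ((a :: b :: t).zip (a :: b :: t).tail)
          = (a, b) :: ((b :: t).zip (b :: t).tail) := rfl
      rw [hz, List.foldl_cons]
      have hfun : (fun (x : DCN) (y : Nat) =>
            g x ((b :: t).getD y "") (t.getD y ""))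
          = (fun d k => g d ((b :: t).getD k "") ((b :: t).getD (k + 1) "")) := by
        funext d k
        rw [List.getD_cons_succ]
      rw [hfun]
      exact ih (b :: t) _ (by simpa using h)

lemma dcnRangeFold_eq_zip (g : DCN → String → String → DCN) :
    ∀ (xs : List String) (d : DCN),
      (PySem.List.pyRange 0 ((xs.length : Int) - 1) 1).foldl
        (fun d i => g d (PySem.List.pyGetD xs i "") (PySem.List.pyGetD xs (i + 1) "")) d
      = (xs.zip xs.tail).foldl (fun d p => g d p.1 p.2) d := by
  intro xs d
  cases xs with
  | nil => rfl
  | cons x t =>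
    have hlen : ((x :: t).length : Int) - 1 = (t.length : Int) := by
      push_cast [List.length_cons]; ring
    rw [hlen]
    have h1 : PySem.List.pyRange 0 (t.length : Int) 1 = PySem.List.pyRange 0 (t.length : Int) := rfl
    rw [h1, PySem.List.pyRange_zero_natCast, List.foldl_map]
    have hfun : (fun (d : DCN) (k : Nat) =>
          g d (PySem.List.pyGetD (x :: t) (↑k) "") (PySem.List.pyGetD (x :: t) (↑k + 1) ""))
        = (fun d k => g d ((x :: t).getD k "") ((x :: t).getD (k + 1) "")) := by
      funext d k
      have hk : ((k : Int) + 1) = ((k + 1 : Nat) : Int) := by push_cast; ring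
      rw [PySem.List.pyGetD_natCast, hk, PySem.List.pyGetD_natCast]
    rw [hfun]
    exact dcnRangeAux g t.length (x :: t) d (by simp)

lemma dcnOfList_append_singleton {α : Type} [BEq α] (xs : List α) (x : α) :
    PySem.Set.ofList (xs ++ [x]) = PySem.Set.add (PySem.Set.ofList xs) x := by
  simp [PySem.Set.ofList_eq_foldl, List.foldl_append]

lemma dcnAdd_of_mem {α : Type} [BEq α] [LawfulBEq α] {s : PySem.Set α} {x : α}
    (h : x ∈ s) : PySem.Set.add s x = s := by simp [PySem.Set.add, h]

lemma dcnAdd_of_not_mem {α : Type} [BEq α] [LawfulBEq α] {s : PySem.Set α} {x : α}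
    (h : x ∉ s) : PySem.Set.add s x = s ++ [x] := by simp [PySem.Set.add, h]

lemma dcnOfList_map_ofList {α β : Type} [BEq α] [LawfulBEq α] [BEq β] [LawfulBEq β]
    (xs : List α) (f : α → β) :
    PySem.Set.ofList ((PySem.Set.ofList xs).map f) = PySem.Set.ofList (xs.map f) := by
  induction xs using List.reverseRecOn with
  | nil => rfl
  | append_singleton xs x ih =>
    rw [dcnOfList_append_singleton, List.map_append, List.map_singleton,
      dcnOfList_append_singleton]
    by_cases hx : x ∈ PySem.Set.ofList xs
    · have hfx : f x ∈ PySem.Set.ofList (xs.map f) := by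
        rw [PySem.Set.mem_ofList]
        exact List.mem_map_of_mem ((PySem.Set.mem_ofList xs x).1 hx)
      rw [dcnAdd_of_mem hx, ih, dcnAdd_of_mem hfx]
    · rw [dcnAdd_of_not_mem hx, List.map_append, List.map_singleton,
        dcnOfList_append_singleton, ih]

lemma dcnOfList_filter {α : Type} [BEq α] [LawfulBEq α] (xs : List α) (p : α → Bool) :
    (PySem.Set.ofList xs).filter p = PySem.Set.ofList (xs.filter p) := by
  induction xs using List.reverseRecOn with
  | nil => rfl
  | append_singleton xs x ih =>
    rw [dcnOfList_append_singleton, List.filter_append]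
    by_cases hx : x ∈ PySem.Set.ofList xs
    · have hx' : x ∈ xs := (PySem.Set.mem_ofList xs x).1 hx
      rw [dcnAdd_of_mem hx]
      by_cases hp : p x = true
      · have : x ∈ PySem.Set.ofList (xs.filter p) := by
          rw [PySem.Set.mem_ofList]; exact List.mem_filter.2 ⟨hx', hp⟩
        simp [hp, dcnOfList_append_singleton, dcnAdd_of_mem this, ih]
      · simp [hp, ih]
    · have hx' : x ∉ xs := fun h => hx ((PySem.Set.mem_ofList xs x).2 h)
      rw [dcnAdd_of_not_mem hx, List.filter_append]
      by_cases hp : p x = true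
      · have : x ∉ PySem.Set.ofList (xs.filter p) := by
          rw [PySem.Set.mem_ofList]; exact fun h => hx' (List.mem_filter.1 h).1
        simp [hp, dcnOfList_append_singleton, dcnAdd_of_not_mem this, ih]
      · simp [hp, ih]

lemma dcnOfList_map_injOn {α β : Type} [BEq α] [LawfulBEq α] [BEq β] [LawfulBEq β]
    (xs : List α) (f : α → β) (hinj : ∀ a ∈ xs, ∀ b ∈ xs, f a = f b → a = b) :
    PySem.Set.ofList (xs.map f) = (PySem.Set.ofList xs).map f := by
  induction xs using List.reverseRecOn with
  | nil => rfl
  | append_singleton xs x ih =>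
    have hinj' : ∀ a ∈ xs, ∀ b ∈ xs, f a = f b → a = b := fun a ha b hb =>
      hinj a (List.mem_append_left _ ha) b (List.mem_append_left _ hb)
    rw [List.map_append]
    simp only [List.map_singleton]
    rw [dcnOfList_append_singleton, dcnOfList_append_singleton, ih hinj']
    by_cases hx : x ∈ PySem.Set.ofList xs
    · have hx' : x ∈ xs := (PySem.Set.mem_ofList xs x).1 hx
      have : f x ∈ (PySem.Set.ofList xs).map f := by
        rw [← ih hinj', PySem.Set.mem_ofList]
        exact List.mem_map_of_mem hx'
      rw [dcnAdd_of_mem this, dcnAdd_of_mem hx]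
    · have hx' : x ∉ xs := fun h => hx ((PySem.Set.mem_ofList xs x).2 h)
      have hfx : f x ∉ (PySem.Set.ofList xs).map f := by
        rw [← ih hinj', PySem.Set.mem_ofList]
        intro h
        obtain ⟨a, ha, hfa⟩ := List.mem_map.1 h
        exact hx' (hinj a (List.mem_append_left _ ha) x (List.mem_append_right _ (List.mem_singleton_self x)) hfa ▸ ha)
      rw [dcnAdd_of_not_mem hfx, dcnAdd_of_not_mem hx, List.map_append, List.map_singleton]

lemma dcnFoldA_keys (ps : List (String × String)) :
    (dcnFoldA ps PySem.Dict.empty).keys = PySem.Set.ofList (ps.map Prod.fst) := by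
  unfold dcnFoldA
  rw [PySem.Dict.keys_foldl_insert_key ps Prod.fst (fun d p => dcnVal d p)]
  simp [PySem.Dict.keys_empty, PySem.Set.update, PySem.Set.ofList_eq_foldl]

lemma dcnFoldA_nodup (ps : List (String × String)) :
    (dcnFoldA ps PySem.Dict.empty).keys.Nodup := by
  unfold dcnFoldA
  exact PySem.Dict.nodup_keys_foldl_insert_key ps Prod.fst (fun d p => dcnVal d p)
    PySem.Dict.empty PySem.Dict.nodup_keys_empty

-- value invariant: inner counts are pair counts

lemma dcnFoldA_getD_getD (ps : List (String × String)) :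
    ∀ (d : DCN) (c n : String),
      ((dcnFoldA ps d).getD c PySem.Dict.empty).getD n 0
        = (d.getD c PySem.Dict.empty).getD n 0 + (List.count (c, n) ps : Int) := by
  induction ps with
  | nil => intro d c n; simp [dcnFoldA]
  | cons p ps ih =>
    obtain ⟨a, b⟩ := p
    intro d c n
    rw [dcnFoldA_cons, ih, List.count_cons]
    by_cases hc : c = a
    · subst hc
      rw [PySem.Dict.getD_insert_self]
      unfold dcnVal
      by_cases hn : n = b
      · subst hn
        rw [PySem.Dict.getD_insert_self]
        by_cases h1 : d.contains c = true
        · by_cases h2 : (d.getD c PySem.Dict.empty).contains n = true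
          · simp [h1, h2]; omega
          · have h2' : (d.getD c PySem.Dict.empty).contains n = false := by simpa using h2
            have hz : (d.getD c PySem.Dict.empty).getD n 0 = 0 :=
              PySem.Dict.getD_of_not_contains _ _ h2'
            simp [h1, h2', hz]; omega
        · have h1' : d.contains c = false := by simpa using h1
          have hz : (d.getD c PySem.Dict.empty).getD n 0 = 0 := by
            rw [PySem.Dict.getD_of_not_contains _ _ h1', PySem.Dict.getD_empty]
          simp [h1', hz]; omega
      · rw [PySem.Dict.getD_insert_of_ne _ _ _ hn]
        simp
        exact fun h => hn h.symm
    · rw [PySem.Dict.getD_insert_of_ne _ _ _ hc]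
      simp
      exact fun h => absurd h.symm hc

lemma dcnFoldA_inner_keys (ps : List (String × String)) :
    ∀ (d : DCN) (c : String),
      ((dcnFoldA ps d).getD c PySem.Dict.empty).keys
        = PySem.Set.update ((d.getD c PySem.Dict.empty).keys)
            ((ps.filter (fun q => q.1 == c)).map Prod.snd) := by
  induction ps with
  | nil => intro d c; simp [dcnFoldA, PySem.Set.update]
  | cons p ps ih =>
    obtain ⟨a, b⟩ := p
    intro d c
    rw [dcnFoldA_cons, ih, List.filter_cons]
    by_cases hc : a = c
    · subst hc
      simp only [beq_self_eq_true, if_pos, List.map_cons]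
      rw [PySem.Dict.getD_insert_self]
      unfold dcnVal
      simp only [PySem.Set.update, List.foldl_cons]
      by_cases hbin : (d.getD a PySem.Dict.empty).contains b = true
      · rw [PySem.Dict.keys_insert_of_contains _ _ hbin,
          dcnAdd_of_mem ((PySem.Dict.contains_iff_mem_keys _ _).1 hbin)]
      · have hbin' : (d.getD a PySem.Dict.empty).contains b = false := by simpa using hbin
        rw [PySem.Dict.keys_insert_of_not_contains _ _ hbin',
          dcnAdd_of_not_mem (fun h => by
            rw [(PySem.Dict.contains_iff_mem_keys _ _).2 h] at hbin'; cases hbin')]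
    · have hb : (a == c) = false := by simp [hc]
      simp only [hb, Bool.false_eq_true, if_neg, not_false_iff]
      rw [PySem.Dict.getD_insert_of_ne _ _ _ (fun h => hc h.symm)]

lemma dcnFoldA_inner_nodup (ps : List (String × String)) :
    ∀ (d : DCN), (∀ c, ((d.getD c PySem.Dict.empty)).keys.Nodup) →
      ∀ c, ((dcnFoldA ps d).getD c PySem.Dict.empty).keys.Nodup := by
  induction ps with
  | nil => intro d h c; simpa [dcnFoldA] using h c
  | cons p ps ih =>
    intro d h c
    rw [dcnFoldA_cons]
    refine ih _ (fun c' => ?_) c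
    by_cases hc : c' = p.1
    · subst hc
      rw [PySem.Dict.getD_insert_self]
      exact PySem.Dict.nodup_keys_insert _ _ _ (h _)
    · rw [PySem.Dict.getD_insert_of_ne _ _ _ hc]
      exact h c'

lemma dcnFoldB_getD (qs : List ((String × String) × Int)) :
    ∀ (r : DCN) (c : String),
      (dcnFoldB qs r).getD c PySem.Dict.empty
        = (qs.filter (fun q => q.1.1 == c)).foldl
            (fun inn q => inn.insert q.1.2 q.2) (r.getD c PySem.Dict.empty) := by
  induction qs with
  | nil => intro r c; simp [dcnFoldB]
  | cons q qs ih =>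
    intro r c
    rw [dcnFoldB_cons, ih, List.filter_cons]
    by_cases hc : q.1.1 = c
    · have hb : (q.1.1 == c) = true := by simp [hc]
      simp only [hb, if_pos, List.foldl_cons]
      rw [hc, PySem.Dict.getD_insert_self]
    · have hb : (q.1.1 == c) = false := by simp [hc]
      simp only [hb, Bool.false_eq_true, if_neg, not_false_iff]
      rw [PySem.Dict.getD_insert_of_ne _ _ _ (fun h => hc h.symm)]

lemma dcnInnerItems (l : List ((String × String) × Int)) :
    ∀ (inn0 : PySem.Dict String Int),
      (∀ q ∈ l, inn0.contains q.1.2 = false) → (l.map (fun q => q.1.2)).Nodup →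
      (l.foldl (fun inn q => inn.insert q.1.2 q.2) inn0).items
        = inn0.items ++ l.map (fun q => (q.1.2, q.2)) := by
  induction l with
  | nil => intro inn0 _ _; simp
  | cons q t ih =>
    intro inn0 hfresh hnd
    simp only [List.foldl_cons, List.map_cons]
    have hq : inn0.contains q.1.2 = false := hfresh q (List.mem_cons_self ..)
    rw [List.map_cons, List.nodup_cons] at hnd
    rw [ih _ (fun q' hq' => ?_) hnd.2]
    · rw [PySem.Dict.items_insert_of_not_contains _ _ hq]
      simp
    · rw [PySem.Dict.contains_insert]
      have h1 : (q'.1.2 == q.1.2) = false := by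
        have : q'.1.2 ≠ q.1.2 := fun h => hnd.1 (h ▸ List.mem_map_of_mem hq')
        simp [this]
      rw [h1, hfresh q' (List.mem_cons_of_mem _ hq')]
      rfl

def dcnForm (ps : List (String × String)) : List (String × List (String × Int)) :=
  (PySem.Set.ofList (ps.map Prod.fst)).map (fun c => (c,
    (PySem.Set.ofList ((ps.filter (fun q => q.1 == c)).map Prod.snd)).map
      (fun n => (n, (List.count (c, n) ps : Int)))))

lemma dcnMainA (words : List String) :
    dictCurrNext words = dcnForm (words.zip words.tail) := by
  unfold dictCurrNext
  rw [dcnRangeFold_eq_zip dcnBodyA]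
  have hb : (fun (d : DCN) (p : String × String) => dcnBodyA d p.1 p.2)
      = (fun d p => d.insert p.1 (dcnVal d p)) := by
    funext d p
    obtain ⟨c, n⟩ := p
    exact dcnBodyA_eq d c n
  rw [hb]
  set ps := words.zip words.tail with hps
  change (dcnFoldA ps PySem.Dict.empty).items.map _ = _
  rw [PySem.Dict.items_eq_map_keys _ (dcnFoldA_nodup ps) PySem.Dict.empty, List.map_map,
    dcnFoldA_keys]
  unfold dcnForm
  apply List.map_congr_left
  intro c _
  simp only [Function.comp_apply]
  have hinnnd : ((dcnFoldA ps PySem.Dict.empty).getD c PySem.Dict.empty).keys.Nodup := by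
    refine dcnFoldA_inner_nodup ps PySem.Dict.empty (fun c' => ?_) c
    simp [PySem.Dict.getD_empty, PySem.Dict.keys_empty]
  rw [PySem.Dict.items_eq_map_keys _ hinnnd (0 : Int), dcnFoldA_inner_keys ps PySem.Dict.empty c]
  have hupd : PySem.Set.update ((PySem.Dict.getD (PySem.Dict.empty : DCN) c PySem.Dict.empty).keys)
      ((ps.filter (fun q => q.1 == c)).map Prod.snd)
      = PySem.Set.ofList ((ps.filter (fun q => q.1 == c)).map Prod.snd) := by
    rw [PySem.Dict.getD_empty, PySem.Dict.keys_empty, PySem.Set.ofList_eq_foldl]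
    rfl
  rw [hupd]
  refine congrArg _ ?_
  apply List.map_congr_left
  intro n _
  have := dcnFoldA_getD_getD ps PySem.Dict.empty c n
  simp only [PySem.Dict.getD_empty] at this
  rw [this]
  simp

lemma dcnMainB (words : List String) :
    dictCurrNext_alt words = dcnForm (words.zip words.tail) := by
  unfold dictCurrNext_alt
  simp only [PySem.List.slice_from_one]
  rw [PySem.Dict.foldl_insert_getD_add_one_eq_counter, PySem.Dict.items_counter]
  have hstep : dcnRegroupStep = (fun (r : DCN) (q : (String × String) × Int) =>
      r.insert q.1.1 ((r.getD q.1.1 PySem.Dict.empty).insert q.1.2 q.2)) := by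
    funext r q
    exact dcnRegroupStep_eq r q
  rw [hstep]
  set ps := words.zip words.tail with hps
  set qs := (PySem.Set.ofList ps).map (fun k => (k, (List.count k ps : Int))) with hqs
  change (dcnFoldB qs PySem.Dict.empty).items.map _ = _
  have hnd : (dcnFoldB qs PySem.Dict.empty).keys.Nodup :=
    PySem.Dict.nodup_keys_foldl_insert_key qs (fun q => q.1.1)
      (fun r q => (r.getD q.1.1 PySem.Dict.empty).insert q.1.2 q.2)
      PySem.Dict.empty PySem.Dict.nodup_keys_empty
  rw [PySem.Dict.items_eq_map_keys _ hnd PySem.Dict.empty, List.map_map]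
  have hkeys : (dcnFoldB qs PySem.Dict.empty).keys = PySem.Set.ofList (ps.map Prod.fst) := by
    show (qs.foldl (fun r q => r.insert q.1.1 ((r.getD q.1.1 PySem.Dict.empty).insert q.1.2 q.2))
        PySem.Dict.empty).keys = _
    rw [PySem.Dict.keys_foldl_insert_key qs (fun q => q.1.1)
      (fun r q => (r.getD q.1.1 PySem.Dict.empty).insert q.1.2 q.2) PySem.Dict.empty]
    rw [PySem.Dict.keys_empty, hqs, List.map_map]
    have h2 : ((fun (q : (String × String) × Int) => q.1.1)
        ∘ (fun k => (k, (List.count k ps : Int)))) = Prod.fst := rfl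
    rw [h2]
    have h3 : PySem.Set.update ([] : List String) ((PySem.Set.ofList ps).map Prod.fst)
        = PySem.Set.ofList ((PySem.Set.ofList ps).map Prod.fst) := by
      rw [PySem.Set.ofList_eq_foldl]; rfl
    rw [h3, dcnOfList_map_ofList]
  rw [hkeys]
  unfold dcnForm
  apply List.map_congr_left
  intro c _
  simp only [Function.comp_apply]
  rw [dcnFoldB_getD qs PySem.Dict.empty c, PySem.Dict.getD_empty]
  rw [hqs, List.filter_map]
  have hpred : ((fun (q : (String × String) × Int) => q.1.1 == c)
      ∘ (fun k => (k, (List.count k ps : Int)))) = (fun k => k.1 == c) := rfl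
  rw [hpred]
  have hfilter : (PySem.Set.ofList ps).filter (fun k => k.1 == c)
      = PySem.Set.ofList (ps.filter (fun k => k.1 == c)) := dcnOfList_filter ps _
  set l := ps.filter (fun k => k.1 == c) with hl
  have hmemc : ∀ k ∈ l, k.1 = c := by
    intro k hk
    have := (List.mem_filter.1 hk).2
    simpa using this
  have hndl : (PySem.Set.ofList (ps.filter (fun k => k.1 == c))).Nodup := PySem.Set.nodup_ofList _
  rw [hfilter]
  rw [dcnInnerItems _ _ (fun q _ => PySem.Dict.contains_empty _) ?hnd2]
  case hnd2 =>
    rw [List.map_map]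
    refine List.Nodup.map_on ?_ hndl
    intro x hx y hy hxy
    have hx' : x ∈ l := (PySem.Set.mem_ofList _ _).1 hx
    have hy' : y ∈ l := (PySem.Set.mem_ofList _ _).1 hy
    have : x.2 = y.2 := by simpa using hxy
    exact Prod.ext ((hmemc x hx').trans (hmemc y hy').symm) this
  rw [List.map_map]
  have hsnd : PySem.Set.ofList (l.map Prod.snd) = (PySem.Set.ofList l).map Prod.snd := by
    refine dcnOfList_map_injOn l Prod.snd ?_
    intro a ha b hb hab
    exact Prod.ext ((hmemc a ha).trans (hmemc b hb).symm) hab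
  refine congrArg _ ?_
  rw [hsnd, List.map_map]
  refine (List.map_congr_left ?_).symm
  intro k hk
  have hk' : k ∈ l := (PySem.Set.mem_ofList _ _).1 hk
  have hck : (c, k.2) = k := Prod.ext (hmemc k hk').symm rfl
  simp only [Function.comp_apply, hck]

-- ===== VERDICT (by name: the statement is the Claim_ definition above) =====
theorem dictCurrNext_spec : Claim_equal_dictCurrNext := by
  intro words _
  show dictCurrNext words = dictCurrNext_alt words
  rw [dcnMainA, dcnMainB]
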